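-- pv_equiv track=rewrite | github.com/BhavikaRamesh/Solutions | Unique number of occurences.py | isFrequencyUnique
-- ===== SOURCE A (Python) =====
-- from typing import List
--
-- def isFrequencyUnique(n : int, arr : List[int]) -> bool:
--     d = {}
--     for i in arr:
--         if i in d:
--             d[i] += 1
--         else:
--             d[i] = 1
--     frequencies = d.values()
--     if len(frequencies) == len(set(frequencies)):
--         return True
--     return False
-- ===== SOURCE B (Python) =====
-- def isFrequencyUnique(n, arr):
--     # sort-and-group instead of a hash-count dict: run lengths of the sorted
--     # copy are the frequencies; uniqueness by adjacent comparison after sorting.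
--     s = sorted(arr)
--     freqs = []
--     i = 0
--     while i < len(s):
--         j = i + 1
--         while j < len(s) and s[j] == s[i]:
--             j += 1
--         freqs.append(j - i)
--         i = j
--     f = sorted(freqs)
--     for a, b in zip(f, f[1:]):
--         if a == b:
--             return False
--     return True
-- ===== Notes on version B (the rewrite author's own statement) =====
-- stated objective: alternative
-- what changed: Replaces the hash-count dict and set-of-values cardinality test by sorting a copy, reading frequencies off as run lengths of consecutive equal elements, then sorting the frequency list and checking adjacent pairs for a duplicate.
import Mathlib
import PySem

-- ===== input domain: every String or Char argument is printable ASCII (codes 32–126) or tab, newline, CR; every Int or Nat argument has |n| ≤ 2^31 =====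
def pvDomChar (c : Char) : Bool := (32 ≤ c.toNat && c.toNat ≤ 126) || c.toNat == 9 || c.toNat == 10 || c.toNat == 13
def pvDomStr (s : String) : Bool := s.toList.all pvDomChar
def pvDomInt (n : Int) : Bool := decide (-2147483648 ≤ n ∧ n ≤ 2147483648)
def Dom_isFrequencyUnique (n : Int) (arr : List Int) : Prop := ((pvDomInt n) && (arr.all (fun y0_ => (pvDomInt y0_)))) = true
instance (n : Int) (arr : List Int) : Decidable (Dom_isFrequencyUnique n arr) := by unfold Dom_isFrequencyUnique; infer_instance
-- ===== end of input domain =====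

-- B replaces A's hash-count dict + set-cardinality test by sorting a copy, reading
-- frequencies as run lengths, and scanning the sorted frequency list for an adjacent
-- duplicate (objective: alternative).

-- ===== PORT A =====
def isFrequencyUnique (n : Int) (arr : List Int) : Bool :=
  let d : PySem.Dict Int Int :=
    arr.foldl (fun d i => if d.contains i then d.insert i (d.getD i 0 + 1) else d.insert i 1)
      PySem.Dict.empty
  let frequencies := d.values
  if (frequencies.length : Int) = ((PySem.Set.ofList frequencies).length : Int) then true
  else false

-- ===== PORT B =====
-- inner while loop as an index scan: advance j while j < len(s) and s[j] == s[i]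
def pvScan (s : List Int) (x : Int) (j : Nat) : Nat :=
  if h : j < s.length then
    if s[j] = x then pvScan s x (j + 1) else j
  else j
termination_by s.length - j

-- the scan never moves backwards (cited by the outer loop's termination proof)
lemma pvScan_ge (s : List Int) (x : Int) (j : Nat) : j ≤ pvScan s x j := by
  induction j using pvScan.induct s x with
  | case1 j h hx ih => rw [pvScan, dif_pos h, if_pos hx]; omega
  | case2 j h hx => rw [pvScan, dif_pos h, if_neg hx]
  | case3 j h => rw [pvScan, dif_neg h]

-- outer while loop: collect run lengths j - i, then continue from i = j
def pvRLEIdx (s : List Int) (i : Nat) : List Int :=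
  if h : i < s.length then
    ((pvScan s s[i] (i + 1) - i : Nat) : Int) :: pvRLEIdx s (pvScan s s[i] (i + 1))
  else []
termination_by s.length - i
decreasing_by have := pvScan_ge s s[i] (i + 1); omega

-- final for-loop over zip(f, f[1:]): false iff some adjacent pair is equal
def pvNoAdjEq : List Int → Bool
  | a :: b :: t => if a = b then false else pvNoAdjEq (b :: t)
  | _ => true

def isFrequencyUnique_alt (n : Int) (arr : List Int) : Bool :=
  let s := PySem.List.sorted arr (fun x => x) false
  let freqs := pvRLEIdx s 0
  let f := PySem.List.sorted freqs (fun x => x) false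
  pvNoAdjEq f

-- ===== PRECONDITION & SPEC =====
def Spec_isFrequencyUnique (n : Int) (arr : List Int) (out : Bool) : Prop := out = isFrequencyUnique_alt n arr
instance (n : Int) (arr : List Int) (out : Bool) : Decidable (Spec_isFrequencyUnique n arr out) := by unfold Spec_isFrequencyUnique; infer_instance

-- ===== CLAIM (what is proved, stated in full; the proofs are below) =====
def Claim_equal_isFrequencyUnique : Prop := ∀ (n : Int) (arr : List Int), Dom_isFrequencyUnique n arr → Spec_isFrequencyUnique n arr (isFrequencyUnique n arr)

-- ===== LEMMAS AND PROOFS =====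

-- proof-side view of B's grouping loop: recursion on the dropped suffix
def pvRun (x : Int) : List Int → Nat
  | [] => 0
  | y :: ys => if y = x then pvRun x ys + 1 else 0

def pvRLE : List Int → List Int
  | [] => []
  | x :: xs => ((pvRun x xs : Nat) + 1 : Int) :: pvRLE (xs.drop (pvRun x xs))
termination_by s => s.length
decreasing_by simp [List.length_drop]

-- the index scan computes the run length of x in the suffix
lemma pvScan_eq (s : List Int) (x : Int) (j : Nat) :
    pvScan s x j = j + pvRun x (s.drop j) := by
  induction j using pvScan.induct s x with
  | case1 j h hx ih =>
    rw [pvScan, dif_pos h, if_pos hx, ih, List.drop_eq_getElem_cons h, hx, pvRun, if_pos rfl]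
    omega
  | case2 j h hx =>
    rw [pvScan, dif_pos h, if_neg hx, List.drop_eq_getElem_cons h, pvRun, if_neg hx]
    omega
  | case3 j h =>
    rw [pvScan, dif_neg h, List.drop_eq_nil_of_le (by omega), pvRun]
    omega

-- the index loop is the drop-suffix recursion
lemma pvRLEIdx_eq (s : List Int) (i : Nat) : pvRLEIdx s i = pvRLE (s.drop i) := by
  induction i using pvRLEIdx.induct s with
  | case1 i h ih =>
    rw [pvRLEIdx, dif_pos h]
    conv_rhs => rw [List.drop_eq_getElem_cons h, pvRLE]
    have hscan := pvScan_eq s s[i] (i + 1)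
    rw [hscan]
    congr 1
    · omega
    · rw [← hscan, ih, hscan, List.drop_drop]
  | case2 i h =>
    rw [pvRLEIdx, dif_neg h, List.drop_eq_nil_of_le (by omega), pvRLE]

-- A's loop body is the standard counter step
lemma foldA_eq_counter (arr : List Int) :
    arr.foldl (fun d i => if d.contains i then d.insert i (d.getD i 0 + 1) else d.insert i 1)
      PySem.Dict.empty = PySem.Dict.counter arr := by
  have hstep : (fun (d : PySem.Dict Int Int) i =>
      if d.contains i then d.insert i (d.getD i 0 + 1) else d.insert i 1)
      = (fun (d : PySem.Dict Int Int) i => d.insert i (d.getD i 0 + 1)) := by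
    funext d i
    by_cases h : d.contains i = true
    · simp [h]
    · have h' : d.contains i = false := by simpa using h
      simp [h', PySem.Dict.getD_of_not_contains d 0 h']
  rw [hstep, PySem.Dict.foldl_insert_getD_add_one_eq_counter]

-- length of a discard never exceeds the list's length
lemma discard_length_le (s : PySem.Set Int) (x : Int) :
    (PySem.Set.discard s x).length ≤ s.length := by
  simpa [PySem.Set.discard] using List.length_filter_le (fun y => !(y == x)) s

-- length of set(l) equals length of l iff l has no duplicates
lemma ofList_length_eq_iff (l : List Int) :
    (PySem.Set.ofList l).length = l.length ↔ l.Nodup := by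
  constructor
  · intro h
    by_contra hnd
    have key : ∀ (m : List Int), ¬ m.Nodup → (PySem.Set.ofList m).length < m.length := by
      intro m
      induction m with
      | nil => intro h; exact absurd List.nodup_nil h
      | cons x xs ih =>
        intro hnd
        rw [PySem.Set.ofList_cons]
        by_cases hx : x ∈ xs
        · have hx' : x ∈ PySem.Set.ofList xs := (PySem.Set.mem_ofList xs x).mpr hx
          have h1 : (PySem.Set.discard (PySem.Set.ofList xs) x).length
              < (PySem.Set.ofList xs).length := by
            simp only [PySem.Set.discard]
            exact List.length_filter_lt_length_iff_exists.mpr ⟨x, hx', by simp⟩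
          have h2 := PySem.Set.length_ofList_le xs
          simp only [List.length_cons]
          omega
        · have hxs : ¬ xs.Nodup := by
            intro hn
            exact hnd (List.nodup_cons.mpr ⟨hx, hn⟩)
          have h1 := ih hxs
          have h2 := discard_length_le (PySem.Set.ofList xs) x
          simp only [List.length_cons]
          omega
    exact absurd h (Nat.ne_of_lt (key l hnd))
  · intro h
    rw [PySem.Set.ofList_eq_self_of_nodup l h]

-- A returns exactly "the frequency list is duplicate-free"
lemma isFrequencyUnique_eq_nodup (n : Int) (arr : List Int) :
    isFrequencyUnique n arr
      = decide (((PySem.Set.ofList arr).map (fun k => (List.count k arr : Int))).Nodup) := by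
  have hv : (PySem.Dict.counter arr).values
      = (PySem.Set.ofList arr).map (fun k => (List.count k arr : Int)) := by
    simp only [PySem.Dict.values, PySem.Dict.items_counter, List.map_map]
    rfl
  simp only [isFrequencyUnique, foldA_eq_counter, hv]
  set vals := (PySem.Set.ofList arr).map (fun k => (List.count k arr : Int)) with hvals
  by_cases hn : vals.Nodup
  · have h1 := (ofList_length_eq_iff vals).mpr hn
    simp [h1, hn]
  · have h1 : (PySem.Set.ofList vals).length ≠ vals.length := fun h =>
      hn ((ofList_length_eq_iff vals).mp h)
    have h2 : ¬ ((vals.length : Int) = ((PySem.Set.ofList vals).length : Int)) := by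
      intro h; exact h1 (by exact_mod_cast h.symm)
    simp [h2, hn]

-- pvRun spec: the front of xs is a run of x …
lemma pvRun_take (x : Int) (xs : List Int) :
    xs.take (pvRun x xs) = List.replicate (pvRun x xs) x := by
  induction xs with
  | nil => simp [pvRun]
  | cons y ys ih =>
    by_cases h : y = x
    · subst h
      simp [pvRun, List.replicate_succ, ih]
    · simp [pvRun, h]

-- … and the remainder does not start with x
lemma pvRun_drop_cons' (x : Int) (xs : List Int) (h : Int) (t : List Int)
    (heq : xs.drop (pvRun x xs) = h :: t) : h ≠ x := by
  induction xs generalizing t with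
  | nil => simp [pvRun] at heq
  | cons y ys ih =>
    by_cases hy : y = x
    · subst hy
      simp only [pvRun, if_pos] at heq
      rw [List.drop_succ_cons] at heq
      exact ih t heq
    · simp only [pvRun, if_neg hy, List.drop_zero] at heq
      rw [List.cons.injEq] at heq
      exact heq.1 ▸ hy

-- every element of the remainder differs from x when the list is sorted
lemma drop_run_ne (x : Int) (xs : List Int) (hs : (x :: xs).Pairwise (· ≤ ·)) :
    ∀ e ∈ xs.drop (pvRun x xs), e ≠ x := by
  cases hdm : xs.drop (pvRun x xs) with
  | nil => intro e he; simp at he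
  | cons h t =>
    intro e he
    have hhead : h ≠ x := pvRun_drop_cons' x xs h t hdm
    have hdsub : (h :: t).Sublist xs := hdm ▸ List.drop_sublist _ xs
    have hdp : (h :: t).Pairwise (· ≤ ·) :=
      List.Pairwise.sublist hdsub (List.Pairwise.of_cons hs)
    have hxle : x ≤ h := (List.pairwise_cons.mp hs).1 h (hdsub.subset (by simp))
    rcases List.mem_cons.mp he with rfl | het
    · exact hhead
    · have hle : h ≤ e := (List.pairwise_cons.mp hdp).1 e het
      intro hex
      apply hhead
      omega

-- set(l) commutes with removing one value
lemma discard_ofList (l : List Int) (x : Int) :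
    PySem.Set.discard (PySem.Set.ofList l) x
      = PySem.Set.ofList (l.filter (fun y => !(y == x))) := by
  have hswap : ∀ (p q : Int → Bool) (t : List Int),
      List.filter p (List.filter q t) = List.filter q (List.filter p t) := by
    intro p q t
    rw [List.filter_filter, List.filter_filter]
    exact List.filter_congr (fun a _ => Bool.and_comm _ _)
  induction l with
  | nil => rfl
  | cons y ys ih =>
    by_cases hy : y = x
    · subst hy
      rw [PySem.Set.ofList_cons]
      simp only [PySem.Set.discard] at ih ⊢
      have hpy : (!(y == y)) = false := by simp
      rw [List.filter_cons, List.filter_cons, hpy]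
      simp only [Bool.false_eq_true, if_false]
      rw [List.filter_filter]
      calc List.filter (fun a => (!(a == y)) && !(a == y)) (PySem.Set.ofList ys)
          = List.filter (fun a => !(a == y)) (PySem.Set.ofList ys) :=
            List.filter_congr (fun a _ => Bool.and_self _)
        _ = PySem.Set.ofList (List.filter (fun a => !(a == y)) ys) := ih
    · have hpy : (!(y == x)) = true := by simp [hy]
      rw [PySem.Set.ofList_cons, List.filter_cons, hpy]
      simp only [if_true]
      rw [PySem.Set.ofList_cons]
      simp only [PySem.Set.discard] at ih ⊢
      rw [List.filter_cons, hpy]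
      simp only [if_true]
      congr 1
      rw [hswap, ih]

-- run lengths of a sorted list are the per-distinct-value counts
lemma pvRLE_sorted (s : List Int) (hs : s.Pairwise (· ≤ ·)) :
    pvRLE s = (PySem.Set.ofList s).map (fun v => (List.count v s : Int)) := by
  induction s using pvRLE.induct with
  | case1 => simp [pvRLE]
  | case2 x xs ih =>
    have hdecomp : xs = List.replicate (pvRun x xs) x ++ xs.drop (pvRun x xs) := by
      conv_lhs => rw [← List.take_append_drop (pvRun x xs) xs]
      rw [pvRun_take]
    set r := pvRun x xs with hr
    set d := xs.drop r with hdd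
    have hdne : ∀ e ∈ d, e ≠ x := drop_run_ne x xs hs
    have hdp : d.Pairwise (· ≤ ·) :=
      List.Pairwise.sublist (List.drop_sublist r xs) (List.Pairwise.of_cons hs)
    have hcx : List.count x (x :: xs) = r + 1 := by
      rw [List.count_cons_self, hdecomp, List.count_append, List.count_replicate_self,
        List.count_eq_zero.mpr (fun hmem => hdne x hmem rfl)]
    have hcne : ∀ v, v ≠ x → List.count v (x :: xs) = List.count v d := by
      intro v hv
      rw [List.count_cons_of_ne (Ne.symm hv), hdecomp, List.count_append,
        List.count_replicate, if_neg (by simpa using Ne.symm hv), Nat.zero_add]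
    have hofl : PySem.Set.ofList (x :: xs) = x :: PySem.Set.ofList d := by
      rw [PySem.Set.ofList_cons, discard_ofList]
      congr 1
      rw [hdecomp, List.filter_append]
      have h1 : (List.replicate r x).filter (fun y => !(y == x)) = [] := by simp
      have h2 : d.filter (fun y => !(y == x)) = d :=
        List.filter_eq_self.mpr (fun a ha => by simpa using hdne a ha)
      rw [h1, h2, List.nil_append]
    rw [pvRLE, hofl, List.map_cons, ih hdp]
    congr 1
    · rw [hcx]; push_cast; ring
    · refine List.map_congr_left (fun v hv => ?_)
      have hvd : v ∈ d := (PySem.Set.mem_ofList d v).mp hv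
      rw [hcne v (hdne v hvd)]

-- the adjacent-pair scan decides "no two neighbours are equal"
lemma pvNoAdjEq_iff_chain (f : List Int) :
    pvNoAdjEq f = true ↔ f.IsChain (· ≠ ·) := by
  induction f with
  | nil => simp [pvNoAdjEq]
  | cons a t ih =>
    cases t with
    | nil => simp [pvNoAdjEq]
    | cons b t' =>
      by_cases hab : a = b
      · simp [pvNoAdjEq, hab, List.isChain_cons_cons]
      · simp [pvNoAdjEq, hab, List.isChain_cons_cons, ih]

-- … and on a weakly increasing list that is exactly Nodup
lemma pvNoAdjEq_sorted_iff (f : List Int) (hf : f.Pairwise (· ≤ ·)) :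
    pvNoAdjEq f = true ↔ f.Nodup := by
  rw [pvNoAdjEq_iff_chain]
  constructor
  · intro hc
    induction f with
    | nil => simp
    | cons a t ih =>
      have hta : ∀ y ∈ t, a ≤ y := (List.pairwise_cons.mp hf).1
      have htp : t.Pairwise (· ≤ ·) := (List.pairwise_cons.mp hf).2
      have htc : t.IsChain (· ≠ ·) := hc.tail
      refine List.nodup_cons.mpr ⟨?_, ih htp htc⟩
      intro hat
      cases t with
      | nil => simp at hat
      | cons b t' =>
        have hab : a ≠ b := (List.isChain_cons_cons.mp hc).1
        rcases List.mem_cons.mp hat with rfl | hat'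
        · exact hab rfl
        · have h1 : a ≤ b := hta b (by simp)
          have h2 : b ≤ a := (List.pairwise_cons.mp htp).1 a hat'
          exact hab (le_antisymm h1 h2)
  · intro hnd
    exact List.Pairwise.isChain hnd

-- ===== VERDICT (by name: the statement is the Claim_ definition above) =====
theorem isFrequencyUnique_spec : Claim_equal_isFrequencyUnique := by
  intro n arr _
  unfold Spec_isFrequencyUnique
  set s := PySem.List.sorted arr (fun x => x) false with hsdef
  have hsp : s.Perm arr := PySem.List.sorted_perm arr (fun x => x) false
  have hspw : s.Pairwise (· ≤ ·) := PySem.List.sorted_pairwise arr (fun x => x)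
  have hfreqs : pvRLE s = (PySem.Set.ofList s).map (fun v => (List.count v s : Int)) :=
    pvRLE_sorted s hspw
  -- the two frequency lists are a permutation of each other
  have hpermSets : (PySem.Set.ofList s).Perm (PySem.Set.ofList arr) := by
    rw [List.perm_ext_iff_of_nodup (PySem.Set.nodup_ofList s) (PySem.Set.nodup_ofList arr)]
    intro a
    rw [PySem.Set.mem_ofList, PySem.Set.mem_ofList]
    exact ⟨fun h => hsp.subset h, fun h => hsp.symm.subset h⟩
  have hcounts : (fun v => (List.count v s : Int)) = (fun v => (List.count v arr : Int)) := by
    funext v; rw [hsp.count_eq v]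
  have hperm : (pvRLE s).Perm ((PySem.Set.ofList arr).map (fun k => (List.count k arr : Int))) := by
    rw [hfreqs, hcounts]
    exact hpermSets.map _
  -- evaluate both sides as "frequencies are duplicate-free"
  rw [isFrequencyUnique_eq_nodup]
  show _ = isFrequencyUnique_alt n arr
  have hBpw : (PySem.List.sorted (pvRLE s) (fun x => x) false).Pairwise (· ≤ ·) :=
    PySem.List.sorted_pairwise (pvRLE s) (fun x => x)
  have hBperm : (PySem.List.sorted (pvRLE s) (fun x => x) false).Perm (pvRLE s) :=
    PySem.List.sorted_perm (pvRLE s) (fun x => x) false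
  have hB : isFrequencyUnique_alt n arr = true
      ↔ ((PySem.Set.ofList arr).map (fun k => (List.count k arr : Int))).Nodup := by
    unfold isFrequencyUnique_alt
    rw [← hsdef]
    show pvNoAdjEq (PySem.List.sorted (pvRLEIdx s 0) (fun x => x) false) = true ↔ _
    rw [pvRLEIdx_eq, List.drop_zero]
    rw [pvNoAdjEq_sorted_iff _ hBpw, hBperm.nodup_iff, hperm.nodup_iff]
  rw [Bool.eq_iff_iff]
  rw [hB]
  simp
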